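-- pv_equiv track=rewrite | github.com/josepablocam/ams | core/extract_sklearn_api.py | get_short_class_desc
-- ===== SOURCE A (Python) =====
-- def get_short_class_desc(docstr):
--     short_desc_lines = []
--     accumulating = False
--     for line in docstr.split("\n"):
--         line = line.strip()
--         if len(line) == 0 and not accumulating:
--             continue
--         elif (len(line) == 0 and accumulating) or line == "Parameters":
--             return "\n".join(short_desc_lines)
--         else:
--             accumulating = True
--             short_desc_lines.append(line)
--     # just in case...
--     return "\n".join(short_desc_lines)
-- ===== SOURCE B (Python) =====
-- from itertools import groupby
--
-- def get_short_class_desc(docstr):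
--     stripped = [l.strip() for l in docstr.split("\n")]
--     paragraphs = [list(g) for nonblank, g in groupby(stripped, key=bool) if nonblank]
--     first = paragraphs[0] if paragraphs else []
--     if "Parameters" in first:
--         first = first[:first.index("Parameters")]
--     return "\n".join(first)
-- ===== Notes on version B (the rewrite author's own statement) =====
-- stated objective: alternative
-- what changed: Instead of A's single loop with a mutable 'accumulating' flag, B strips all lines, groups them into paragraphs with itertools.groupby keyed on non-blankness, takes the first paragraph and truncates it at a 'Parameters' line found by list membership/index.
import Mathlib
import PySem

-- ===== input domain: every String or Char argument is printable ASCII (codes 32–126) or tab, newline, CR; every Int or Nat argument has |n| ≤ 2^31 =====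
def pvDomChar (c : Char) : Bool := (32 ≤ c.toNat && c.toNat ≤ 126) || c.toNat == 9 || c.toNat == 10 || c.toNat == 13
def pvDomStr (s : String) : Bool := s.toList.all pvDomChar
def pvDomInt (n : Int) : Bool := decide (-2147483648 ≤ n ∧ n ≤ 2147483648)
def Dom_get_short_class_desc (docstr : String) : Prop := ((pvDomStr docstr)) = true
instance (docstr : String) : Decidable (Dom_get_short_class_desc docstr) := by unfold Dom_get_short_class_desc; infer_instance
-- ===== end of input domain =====

-- B replaces A's single loop with a mutable 'accumulating' flag by a paragraph view:
-- group stripped lines with groupby on non-blankness, take the first non-blank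
-- paragraph, truncate it at a 'Parameters' line; objective: alternative, same cost.

-- ===== PORT A =====
-- loop of A: state = (accumulated lines, accumulating flag)
def pvLoopA : List String → List String → Bool → List String
  | [], acc, _ => acc
  | l :: ls, acc, accumulating =>
    let line := PySem.Str.strip l
    if PySem.Str.len line = 0 ∧ accumulating = false then
      pvLoopA ls acc accumulating
    else if (PySem.Str.len line = 0 ∧ accumulating = true) ∨ line = "Parameters" then
      acc
    else
      pvLoopA ls (acc ++ [line]) true

def get_short_class_desc (docstr : String) : String :=
  PySem.Str.join "\n" (pvLoopA (((PySem.Str.split? docstr "\n").getD [])) [] false)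

-- ===== PORT B =====
-- itertools.groupby(ls, key=bool) on a list of strings: runs of equal key (l != "")
def pvGroupBy : List String → List (Bool × List String)
  | [] => []
  | l :: ls =>
    let k := l != ""
    (k, l :: ls.takeWhile (fun x => (x != "") == k)) ::
      pvGroupBy (ls.dropWhile (fun x => (x != "") == k))
termination_by ls => ls.length
decreasing_by
  exact Nat.lt_succ_of_le (List.length_dropWhile_le _ _)

def get_short_class_desc_alt (docstr : String) : String :=
  let stripped := (((PySem.Str.split? docstr "\n").getD [])).map PySem.Str.strip
  let paragraphs := (pvGroupBy stripped).filterMap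
      (fun p => if p.1 then some p.2 else none)
  let first := paragraphs.headD []
  let first :=
    if first.contains "Parameters" then
      first.take ((PySem.List.index? first "Parameters").getD 0)
    else first
  PySem.Str.join "\n" first

-- ===== PRECONDITION & SPEC =====
def Spec_get_short_class_desc (docstr : String) (out : String) : Prop := out = get_short_class_desc_alt docstr
instance (docstr : String) (out : String) : Decidable (Spec_get_short_class_desc docstr out) := by unfold Spec_get_short_class_desc; infer_instance

-- ===== CLAIM (what is proved, stated in full; the proofs are below) =====
def Claim_equal_get_short_class_desc : Prop := ∀ (docstr : String), Dom_get_short_class_desc docstr → Spec_get_short_class_desc docstr (get_short_class_desc docstr)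

-- ===== LEMMAS AND PROOFS =====

-- A's loop once accumulating: append all further stripped lines until blank/'Parameters'
theorem pvLoopA_true (ls : List String) (acc : List String) :
    pvLoopA ls acc true =
      acc ++ (ls.map PySem.Str.strip).takeWhile (fun l => l != "" && l != "Parameters") := by
  induction ls generalizing acc with
  | nil => simp [pvLoopA]
  | cons l ls ih =>
    simp only [pvLoopA, List.map_cons, List.takeWhile_cons]
    by_cases h : PySem.Str.strip l = ""
    · simp [h]
    · have h' : ¬ PySem.Chars.strip l.toList = [] := by
        simpa [← PySem.Str.toList_strip] using h
      by_cases hp : PySem.Str.strip l = "Parameters"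
      · simp [hp]
      · simp [h, hp, h', ih]

-- A's whole loop: skip leading blanks, then take until blank/'Parameters'
theorem pvLoopA_false (ls : List String) :
    pvLoopA ls [] false =
      ((ls.map PySem.Str.strip).dropWhile (· == "")).takeWhile
        (fun l => l != "" && l != "Parameters") := by
  induction ls with
  | nil => simp [pvLoopA]
  | cons l ls ih =>
    simp only [pvLoopA, List.map_cons, List.dropWhile_cons]
    by_cases h : PySem.Str.strip l = ""
    · simp [h, ih]
    · have h' : ¬ PySem.Chars.strip l.toList = [] := by
        simpa [← PySem.Str.toList_strip] using h
      by_cases hp : PySem.Str.strip l = "Parameters"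
      · simp [hp]
      · simp [h, hp, h', pvLoopA_true]

-- the first non-blank group of groupby = takeWhile nonblank after dropWhile blank
theorem pvGroupBy_first (ls : List String) :
    ((pvGroupBy ls).filterMap (fun p => if p.1 then some p.2 else none)).headD [] =
      (ls.dropWhile (· == "")).takeWhile (· != "") := by
  fun_induction pvGroupBy ls with
  | case1 => simp
  | case2 l ls k ih =>
    by_cases h : l = ""
    · subst h
      have hk0 : k = false := rfl
      have hpred : (fun x : String => (x != "") == k) = (fun x => x == "") := by
        funext x; simp [hk0, bne]
      rw [hpred] at ih ⊢
      simp only [List.dropWhile_cons]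
      simpa [List.dropWhile_idempotent] using ih
    · have hk1 : k = true := by
        simp only [show k = (l != "") from rfl]; simp [h]
      have hpred : (fun x : String => (x != "") == k) = (fun x => x != "") := by
        funext x; simp [hk1]
      rw [hpred]
      simp [hk1, h]

-- truncation at 'Parameters' via contains/index?/take = takeWhile (· ≠ 'Parameters')
theorem pvCut_eq_takeWhile (xs : List String) :
    (if xs.contains "Parameters" then
        xs.take ((PySem.List.index? xs "Parameters").getD 0)
      else xs) = xs.takeWhile (· != "Parameters") := by
  induction xs with
  | nil => simp
  | cons x xs ih =>
    by_cases hx : x = "Parameters"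
    · subst hx
      rw [PySem.List.index?_cons_self]
      simp
    · rw [PySem.List.index?_cons_of_ne xs hx]
      by_cases hm : "Parameters" ∈ xs
      · obtain ⟨k, hk⟩ := Option.isSome_iff_exists.mp
          ((PySem.List.index?_isSome_iff xs "Parameters").mpr hm)
        rw [if_pos (show (x :: xs).contains "Parameters" = true by simp [hm])]
        rw [if_pos (by simpa using hm), hk] at ih
        rw [hk]
        simp only [Option.map_some, Option.getD_some, List.take_succ_cons] at *
        simp [hx, ih]
      · rw [if_neg (by simp [hm, Ne.symm hx])]
        rw [if_neg (by simpa using hm)] at ih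
        simp [hx, ← ih]

-- ===== VERDICT (by name: the statement is the Claim_ definition above) =====
theorem get_short_class_desc_spec : Claim_equal_get_short_class_desc := by
  intro docstr _
  unfold Spec_get_short_class_desc get_short_class_desc get_short_class_desc_alt
  rw [pvLoopA_false]
  simp only [pvGroupBy_first, pvCut_eq_takeWhile, List.takeWhile_takeWhile]
  congr 2
  funext l
  by_cases h1 : l = "" <;> by_cases h2 : l = "Parameters" <;> simp [h1, h2]
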